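-- pv_equiv track=rewrite | github.com/tripstych/elemental-conlang | logo_asian_gene.py | tokenize_phonemes
-- ===== SOURCE A (Python) =====
-- ONSET_PHONES = {
--     'n': ['b', 'd', 'g', 'm', 'n', 'l', 'z', 'zh', 'w'],
--     'v': ['p', 't', 'k', 'ch', 'c', 'j', 'q', 'r'],
--     'a': ['f', 's', 'x', 'h', 'sh', 'y', 'w'],
--     'r': ['l', 'r', 'w', 'y']
-- }
--
-- NUCLEUS_VOWELS = {
--     'wood':  ['i', 'e', 'ia', 'ie', 'ye'],
--     'fire':  ['a', 'ai', 'ao', 'ya', 'ua'],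
--     'earth': ['u', 'o', 'ou', 'uo', 'e'],
--     'metal': ['ei', 'ui', 'iu', 'ue'],
--     'water': ['yu', 'oi', 'yo', 'wa']
-- }
--
-- CODAS = {
--     'wood':  ['n', 'l'],         # Gentle endings
--     'fire':  ['ng', 'n'],        # Resonant, rising
--     'earth': ['m', 'ng'],        # Heavy, grounding
--     'metal': ['k', 't'],         # Sharp stops (Cantonese/Hakka style)
--     'water': ['m', 'n', 'ng']    # Flowing nasals
-- }
--
-- def _build_phoneme_units():
--     units = set()
--     for cat in ONSET_PHONES.values(): units.update(cat)
--     for cat in NUCLEUS_VOWELS.values(): units.update(cat)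
--     for cat in CODAS.values(): units.update(cat)
--     return units
--
-- def tokenize_phonemes(word):
--     # Simple tokenizer used for scrambling logic
--     # In this Asian-style conlang, we can treat vowels/diphthongs as units
--     phoneme_units = _build_phoneme_units()
--     digraphs = sorted([u for u in phoneme_units if len(u) > 1], key=len, reverse=True)
--
--     tokens = []
--     i = 0
--     while i < len(word):
--         match_found = False
--         for dg in digraphs:
--             if word.startswith(dg, i):
--                 tokens.append(dg)
--                 i += len(dg)
--                 match_found = True
--                 break
--         if not match_found:
--             tokens.append(word[i])
--             i += 1
--     return tokens
-- ===== SOURCE B (Python) =====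
-- # Same tokenization, but the phoneme-unit set is built once at module load and the
-- # inner scan over the digraph list is replaced by one O(1) membership test of the
-- # two-character slice at the cursor (every multi-char unit has length 2).
-- _PHONEME_DIGRAPHS = frozenset([
--     "zh", "ch", "sh", "ia", "ie", "ye", "ai", "ao", "ya", "ua",
--     "ou", "uo", "ei", "ui", "iu", "ue", "yu", "oi", "yo", "wa", "ng",
-- ])
--
-- def tokenize_phonemes(word):
--     tokens = []
--     i = 0
--     n = len(word)
--     while i < n:
--         pair = word[i:i + 2]
--         if pair in _PHONEME_DIGRAPHS:
--             tokens.append(pair)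
--             i += 2
--         else:
--             tokens.append(word[i])
--             i += 1
--     return tokens
-- ===== Notes on version B (the rewrite author's own statement) =====
-- stated objective: faster
-- what changed: B precomputes the digraph set once as a module constant and replaces A's per-call unit-set construction, sort, and per-position linear scan over the digraph list with startswith by a single O(1) frozenset membership test of the two-character slice at the cursor (all multi-char units have length 2).
import Mathlib
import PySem

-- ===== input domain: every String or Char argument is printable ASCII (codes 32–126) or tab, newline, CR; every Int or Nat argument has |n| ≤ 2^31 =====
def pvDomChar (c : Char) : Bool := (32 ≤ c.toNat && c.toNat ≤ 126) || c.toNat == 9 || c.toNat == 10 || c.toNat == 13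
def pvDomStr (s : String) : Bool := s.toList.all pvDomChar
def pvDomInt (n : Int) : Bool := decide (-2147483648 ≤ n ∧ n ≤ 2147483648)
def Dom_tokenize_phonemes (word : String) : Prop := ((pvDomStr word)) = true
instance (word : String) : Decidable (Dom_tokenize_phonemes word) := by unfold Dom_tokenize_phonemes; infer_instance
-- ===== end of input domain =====

-- B replaces A's per-call unit-set construction and inner digraph scan by a precomputed
-- digraph set and one membership test of the two-character slice at the cursor.

-- ===== PORT A =====
def pvOnsetPhones : PySem.Dict String (List String) := PySem.Dict.ofList
  [("n", ["b","d","g","m","n","l","z","zh","w"]),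
   ("v", ["p","t","k","ch","c","j","q","r"]),
   ("a", ["f","s","x","h","sh","y","w"]),
   ("r", ["l","r","w","y"])]

def pvNucleusVowels : PySem.Dict String (List String) := PySem.Dict.ofList
  [("wood", ["i","e","ia","ie","ye"]),
   ("fire", ["a","ai","ao","ya","ua"]),
   ("earth", ["u","o","ou","uo","e"]),
   ("metal", ["ei","ui","iu","ue"]),
   ("water", ["yu","oi","yo","wa"])]

def pvCodas : PySem.Dict String (List String) := PySem.Dict.ofList
  [("wood", ["n","l"]), ("fire", ["ng","n"]), ("earth", ["m","ng"]),
   ("metal", ["k","t"]), ("water", ["m","n","ng"])]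

-- _build_phoneme_units: a set updated with each category list
def pvBuildPhonemeUnits : PySem.Set String :=
  let units := PySem.Set.empty
  let units := (PySem.Dict.values pvOnsetPhones).foldl (fun u cat => PySem.Set.update u cat) units
  let units := (PySem.Dict.values pvNucleusVowels).foldl (fun u cat => PySem.Set.update u cat) units
  let units := (PySem.Dict.values pvCodas).foldl (fun u cat => PySem.Set.update u cat) units
  units

-- digraphs = sorted([u for u in phoneme_units if len(u) > 1], key=len, reverse=True)
-- (the Set is consumed in insertion order; the result below is order-independent,
--  since all units of length > 1 have length exactly 2, so at most one can match at a position)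
def pvDigraphsA : List String :=
  PySem.List.sorted (pvBuildPhonemeUnits.filter (fun u => PySem.Str.len u > 1))
    (key := fun u => PySem.Str.len u) (reverse := true)

-- every digraph is nonempty (needed for termination of the while loop: i strictly increases)
set_option maxRecDepth 8192 in
theorem pvDigraphsA_pos : ∀ dg ∈ pvDigraphsA, 0 < dg.toList.length := by decide

-- the while loop of A: i walks the word; the inner 'for dg … break' is the first
-- dg with word.startswith(dg, i), i.e. find? over the digraph list (exact: i ≥ 0, and
-- startswith(dg, i) is dg.toList being a prefix of the character suffix at i)
set_option maxRecDepth 8192 in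
def pvLoopA (cs : List Char) (i : Nat) (tokens : List String) : List String :=
  if _h : i < cs.length then
    match hm : pvDigraphsA.find? (fun dg => dg.toList.isPrefixOf (cs.drop i)) with
    | some dg => pvLoopA cs (i + dg.toList.length) (tokens ++ [dg])
    | none => pvLoopA cs (i + 1) (tokens ++ [String.ofList [cs.getD i ' ']])
  else tokens
  termination_by cs.length - i
  decreasing_by
  · have := pvDigraphsA_pos dg (List.mem_of_find?_eq_some hm)
    omega
  · omega

def tokenize_phonemes (word : String) : List String :=
  pvLoopA word.toList 0 []

-- ===== PORT B =====
def pvDigraphSet : PySem.Set String := PySem.Set.ofList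
  ["zh","ch","sh","ia","ie","ye","ai","ao","ya","ua","ou","uo","ei","ui","iu","ue","yu","oi","yo","wa","ng"]

-- the while loop of Source B: pair = word[i:i+2]; O(1) membership test of the pair
def pvLoopB (cs : List Char) (i : Nat) (tokens : List String) : List String :=
  if _h : i < cs.length then
    let pair := String.ofList ((cs.drop i).take 2)
    if PySem.Set.contains pvDigraphSet pair then
      pvLoopB cs (i + 2) (tokens ++ [pair])
    else
      pvLoopB cs (i + 1) (tokens ++ [String.ofList [cs.getD i ' ']])
  else tokens
  termination_by cs.length - i

def tokenize_phonemes_alt (word : String) : List String :=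
  pvLoopB word.toList 0 []

-- ===== PRECONDITION & SPEC =====
def Spec_tokenize_phonemes (word : String) (out : List String) : Prop := out = tokenize_phonemes_alt word
instance (word : String) (out : List String) : Decidable (Spec_tokenize_phonemes word out) := by unfold Spec_tokenize_phonemes; infer_instance

-- ===== CLAIM (what is proved, stated in full; the proofs are below) =====
def Claim_equal_tokenize_phonemes : Prop := ∀ (word : String), Dom_tokenize_phonemes word → Spec_tokenize_phonemes word (tokenize_phonemes word)

-- ===== LEMMAS AND PROOFS =====

-- A's computed digraph list, evaluated
set_option maxRecDepth 8192 in
theorem pvDigraphsA_eq : pvDigraphsA =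
    ["zh","ch","sh","ia","ie","ye","ai","ao","ya","ua","ou","uo","ei","ui","iu","ue","yu","oi","yo","wa","ng"] := by
  decide

set_option maxRecDepth 8192 in
theorem pvDigraphsA_len : ∀ dg ∈ pvDigraphsA, dg.toList.length = 2 := by decide

-- find? over a list on which the predicate holds exactly at one value a
theorem find?_unique {α : Type} [DecidableEq α] {p : α → Bool} {a : α} :
    ∀ {l : List α}, (∀ x ∈ l, (p x = true ↔ x = a)) →
      l.find? p = if a ∈ l then some a else none := by
  intro l
  induction l with
  | nil => intro _; simp
  | cons x xs ih =>
    intro h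
    by_cases hx : p x = true
    · have hxa : x = a := (h x (by simp)).1 hx
      subst hxa
      simp [List.find?, hx]
    · have hxa : x ≠ a := fun e => hx ((h x (by simp)).2 e)
      have : xs.find? p = if a ∈ xs then some a else none :=
        ih (fun y hy => h y (by simp [hy]))
      simp only [List.find?, Bool.not_eq_true] at *
      rw [hx, this]
      simp [List.mem_cons, Ne.symm hxa]

-- the scan at a position with at least two remaining characters
theorem find?_at (c1 c2 : Char) (rest : List Char) :
    pvDigraphsA.find? (fun dg => dg.toList.isPrefixOf (c1 :: c2 :: rest)) =
      if String.ofList [c1, c2] ∈ pvDigraphsA then some (String.ofList [c1, c2]) else none := by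
  apply find?_unique
  intro dg hdg
  have h2 : dg.toList.length = 2 := pvDigraphsA_len dg hdg
  constructor
  · intro hp
    obtain ⟨t, ht⟩ := List.isPrefixOf_iff_prefix.mp hp
    rcases e : dg.toList with _ | ⟨a, _ | ⟨b, _ | _⟩⟩ <;> rw [e] at h2 ht <;> simp at h2 ht ⊢
    obtain ⟨ha, hb, -⟩ := ht
    have : dg.toList = [c1, c2] := by rw [e, ha, hb]
    calc dg = String.ofList dg.toList := String.ofList_toList.symm
      _ = String.ofList [c1, c2] := by rw [this]
  · intro e
    subst e
    simp
-- the scan at a position with exactly one remaining character finds nothing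
set_option maxRecDepth 8192 in
theorem find?_one (c1 : Char) :
    pvDigraphsA.find? (fun dg => dg.toList.isPrefixOf [c1]) = none := by
  rw [pvDigraphsA_eq]
  simp [List.find?, List.isPrefixOf, Bool.and_false]

-- membership in A's digraph list is B's set test
theorem mem_iff_contains (s : String) :
    s ∈ pvDigraphsA ↔ PySem.Set.contains pvDigraphSet s = true := by
  rw [pvDigraphsA_eq, PySem.Set.contains_iff, pvDigraphSet, PySem.Set.mem_ofList]

theorem loop_eq : ∀ (n : Nat) (cs : List Char) (i : Nat) (tokens : List String),
    cs.length - i ≤ n → pvLoopA cs i tokens = pvLoopB cs i tokens := by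
  intro n
  induction n with
  | zero =>
    intro cs i tokens h
    have hge : ¬ i < cs.length := by omega
    rw [pvLoopA, pvLoopB]
    simp [hge]
  | succ n ih =>
    intro cs i tokens h
    by_cases hlt : i < cs.length
    · have hd : cs.drop i ≠ [] := by
        intro e
        have := List.length_drop (l := cs) (i := i)
        rw [e] at this
        simp at this
        omega
      rw [pvLoopA, pvLoopB]
      simp only [hlt, dif_pos]
      match hdrop : cs.drop i with
      | [] => exact absurd hdrop hd
      | [c1] =>
        split
        · next dg hm =>
          rw [find?_one] at hm
          exact absurd hm (by simp)
        · next hm =>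
          have hone : String.ofList [c1] ∉ pvDigraphsA := by
            intro hmem
            have := pvDigraphsA_len _ hmem
            simp at this
          have hc := (mem_iff_contains (String.ofList [c1])).not.mp hone
          simp only [Bool.not_eq_true] at hc
          simp only [List.take_succ_cons, List.take_nil, hc, Bool.false_eq_true, if_false]
          exact ih cs (i + 1) _ (by omega)
      | c1 :: c2 :: rest =>
        simp only [List.take_succ_cons, List.take_zero]
        split
        · next dg hm =>
          rw [find?_at] at hm
          by_cases hmem : String.ofList [c1, c2] ∈ pvDigraphsA
          · rw [if_pos hmem] at hm
            obtain rfl : String.ofList [c1, c2] = dg := by injection hm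
            have hc : PySem.Set.contains pvDigraphSet (String.ofList [c1, c2]) = true :=
              (mem_iff_contains _).mp hmem
            simp only [hc, if_true]
            have hlen : (String.ofList [c1, c2]).toList.length = 2 := by
              simp
            rw [hlen]
            exact ih cs (i + 2) _ (by omega)
          · rw [if_neg hmem] at hm
            cases hm
        · next hm =>
          rw [find?_at] at hm
          by_cases hmem : String.ofList [c1, c2] ∈ pvDigraphsA
          · rw [if_pos hmem] at hm
            cases hm
          · have hc := (mem_iff_contains (String.ofList [c1, c2])).not.mp hmem
            simp only [Bool.not_eq_true] at hc
            simp only [hc, Bool.false_eq_true, if_false]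
            exact ih cs (i + 1) _ (by omega)
    · rw [pvLoopA, pvLoopB]
      simp [hlt]

-- ===== VERDICT (by name: the statement is the Claim_ definition above) =====
theorem tokenize_phonemes_spec : Claim_equal_tokenize_phonemes := by
  intro word _
  unfold Spec_tokenize_phonemes tokenize_phonemes tokenize_phonemes_alt
  exact loop_eq word.toList.length word.toList 0 [] (by omega)
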